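-- pv_equiv track=rewrite | github.com/bluepabburi/algorithm_problem | plus.py | solution
-- ===== SOURCE A (Python) =====
-- def solution(absolutes, signs):
--     answer = 0
--
--     for i in range(len(absolutes)):
--         if signs[i] == False:
--             absolutes[i] = absolutes[i] *  -1
--
--         else:
--             pass
--
--         answer = sum(absolutes)
--
--     return answer
-- ===== SOURCE B (Python) =====
-- def solution(absolutes, signs):
--     total = 0
--     for a, s in zip(absolutes, signs):
--         total += a if s else -a
--     return total
-- ===== Notes on version B (the rewrite author's own statement) =====
-- stated objective: faster
-- what changed: Single accumulating pass over zip(absolutes, signs) instead of re-summing the whole (mutated) list after every index, removing the O(n) inner sum and the in-place mutation.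
import Mathlib
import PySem

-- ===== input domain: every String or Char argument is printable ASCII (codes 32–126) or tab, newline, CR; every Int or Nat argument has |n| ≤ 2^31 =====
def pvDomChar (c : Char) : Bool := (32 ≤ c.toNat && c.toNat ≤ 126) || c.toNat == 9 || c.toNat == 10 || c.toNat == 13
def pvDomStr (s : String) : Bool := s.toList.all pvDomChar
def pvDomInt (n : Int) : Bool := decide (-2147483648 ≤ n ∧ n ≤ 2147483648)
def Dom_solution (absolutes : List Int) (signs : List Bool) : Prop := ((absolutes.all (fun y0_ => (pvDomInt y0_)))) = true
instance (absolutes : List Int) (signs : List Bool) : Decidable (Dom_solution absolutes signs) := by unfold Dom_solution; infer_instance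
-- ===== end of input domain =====

-- B replaces A's per-index re-sum of the whole list (quadratic) by one accumulating pass over zip;
-- A mutates `absolutes` in place (sign flips) — the equivalence proved here is about the RETURN value only.


-- ===== PORT A =====
-- Loop over range(len(absolutes)); state = (current list, answer); each step flips absolutes[i]
-- in place when signs[i] is False and then recomputes answer = sum(absolutes).
def solution (absolutes : List Int) (signs : List Bool) : Int :=
  (((PySem.List.pyRange 0 (absolutes.length : Int) 1).foldl
      (fun (st : List Int × Int) i =>
        let a :=
          if (PySem.List.pyGet? signs i).getD true = false then
            st.1.set i.toNat (((PySem.List.pyGet? st.1 i).getD 0) * (-1))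
          else st.1
        (a, a.sum))
      (absolutes, 0))).2

-- ===== PORT B =====
-- Single pass: total += a if s else -a over zip(absolutes, signs).
def solution_alt (absolutes : List Int) (signs : List Bool) : Int :=
  (absolutes.zip signs).foldl (fun total p => total + (if p.2 then p.1 else -p.1)) 0

-- ===== PRECONDITION & SPEC =====
-- Pre_ excludes exactly the inputs where A raises IndexError: signs[i] with i ≥ len(signs).
def Pre_solution (absolutes : List Int) (signs : List Bool) : Prop :=
  absolutes.length ≤ signs.length
instance (absolutes : List Int) (signs : List Bool) : Decidable (Pre_solution absolutes signs) := by unfold Pre_solution; infer_instance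
def pvWitness_solution : List Int × List Bool := ([4, 7, 12], [true, false, true])
def Spec_solution (absolutes : List Int) (signs : List Bool) (out : Int) : Prop := out = solution_alt absolutes signs
instance (absolutes : List Int) (signs : List Bool) (out : Int) : Decidable (Spec_solution absolutes signs out) := by unfold Spec_solution; infer_instance

-- ===== CLAIM (what is proved, stated in full; the proofs are below) =====
def Claim_equal_solution : Prop := ∀ (absolutes : List Int) (signs : List Bool), Dom_solution absolutes signs → Pre_solution absolutes signs → Spec_solution absolutes signs (solution absolutes signs)

-- ===== LEMMAS AND PROOFS =====

-- signed value of one entry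
def pvTr (x : Int) (b : Bool) : Int := if b then x else -x

-- the list A's loop has built after processing indices 0..m-1
def pvPref (a : List Int) (s : List Bool) (m : Nat) : List Int :=
  List.zipWith pvTr (a.take m) (s.take m) ++ a.drop m

lemma pv_set_append_len {α : Type} (l r : List α) (x v : α) :
    (l ++ x :: r).set l.length v = l ++ v :: r := by
  induction l with
  | nil => rfl
  | cons h t ih => simp [ih]

lemma pvPref_eq_cons (a : List Int) (s : List Bool) (m : Nat) (hm : m < a.length) :
    pvPref a s m = List.zipWith pvTr (a.take m) (s.take m) ++ a[m] :: a.drop (m + 1) := by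
  rw [pvPref, List.drop_eq_getElem_cons hm]

lemma pvPref_succ (a : List Int) (s : List Bool) (m : Nat) (hm : m < a.length)
    (hs : m < s.length) :
    pvPref a s (m + 1) =
      List.zipWith pvTr (a.take m) (s.take m) ++ pvTr a[m] s[m] :: a.drop (m + 1) := by
  rw [pvPref, ← List.take_concat_get' a m hm, ← List.take_concat_get' s m hs,
    List.zipWith_append (by simp [hm.le, hs.le])]
  simp

lemma pvPref_len_take (a : List Int) (s : List Bool) (m : Nat) (hm : m ≤ a.length)
    (hs : m ≤ s.length) :
    (List.zipWith pvTr (a.take m) (s.take m)).length = m := by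
  simp [hm, hs]

-- A's loop invariant: after indices 0..m-1 the list is pvPref and answer is its sum (0 before the first pass)
lemma pvLoopA (a : List Int) (s : List Bool) (hs : a.length ≤ s.length) (m : Nat)
    (hm : m ≤ a.length) :
    ((PySem.List.pyRange 0 (m : Int) 1).foldl
      (fun (st : List Int × Int) i =>
        let a :=
          if (PySem.List.pyGet? s i).getD true = false then
            st.1.set i.toNat (((PySem.List.pyGet? st.1 i).getD 0) * (-1))
          else st.1
        (a, a.sum))
      (a, 0))
    = (pvPref a s m, if m = 0 then 0 else (pvPref a s m).sum) := by
  induction m with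
  | zero => simp [pvPref]
  | succ m ih =>
    have hm' : m < a.length := by omega
    have hms : m < s.length := by omega
    have hrange : ((m + 1 : Nat) : Int) = (m : Int) + 1 := by push_cast; ring
    rw [hrange, PySem.List.pyRange_one_succ_right (by positivity), List.foldl_append,
      ih (by omega)]
    have hget_s : PySem.List.pyGet? s (m : Int) = some s[m] := by
      simp [PySem.List.pyGet?_natCast, List.getElem?_eq_getElem hms]
    have hlen : (List.zipWith pvTr (a.take m) (s.take m)).length = m :=
      pvPref_len_take a s m hm'.le hms.le
    have hget_a : PySem.List.pyGet? (pvPref a s m) (m : Int) = some a[m] := by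
      rw [pvPref_eq_cons a s m hm', PySem.List.pyGet?_natCast,
        List.getElem?_append_right hlen.le, hlen]
      simp
    simp only [List.foldl_cons, List.foldl_nil, hget_s, hget_a, Option.getD_some]
    cases hsm : s[m] with
    | true =>
      have hPP : pvPref a s (m + 1) = pvPref a s m := by
        rw [pvPref_succ a s m hm' hms, pvPref_eq_cons a s m hm']
        simp [pvTr, hsm]
      simp [hPP]
    | false =>
      have hset := pv_set_append_len (List.zipWith pvTr (a.take m) (s.take m))
        (a.drop (m + 1)) (a[m]) (a[m] * (-1))
      rw [hlen] at hset
      have hPP : pvPref a s (m + 1) = (pvPref a s m).set m (a[m] * (-1)) := by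
        rw [pvPref_succ a s m hm' hms, pvPref_eq_cons a s m hm', hset]
        simp [pvTr, hsm]
      simp [hPP]

lemma pv_zipWith_take_right (a : List Int) (s : List Bool) :
    List.zipWith pvTr a (s.take a.length) = List.zipWith pvTr a s := by
  induction a generalizing s with
  | nil => rfl
  | cons x t ih =>
    cases s with
    | nil => rfl
    | cons y u => simp [List.zipWith, ih]

lemma pv_zipWith_eq_map_zip (a : List Int) (s : List Bool) :
    List.zipWith pvTr a s = (a.zip s).map (fun p => pvTr p.1 p.2) := by
  induction a generalizing s with
  | nil => rfl
  | cons x t ih =>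
    cases s with
    | nil => rfl
    | cons y u => simp [List.zip_cons_cons, ih]

-- ===== VERDICT (by name: the statement is the Claim_ definition above) =====
theorem solution_spec : Claim_equal_solution := by
  intro a s _ hpre
  unfold Spec_solution solution solution_alt
  rw [pvLoopA a s hpre a.length le_rfl]
  have hB : (List.foldl (fun total p => total + (if p.2 then p.1 else -p.1)) 0 (a.zip s))
      = ((a.zip s).map (fun p => pvTr p.1 p.2)).sum := by
    have := PySem.List.foldl_add (a.zip s) (fun p => pvTr p.1 p.2) 0
    simpa [pvTr] using this
  rw [hB, ← pv_zipWith_eq_map_zip]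
  have hfull : pvPref a s a.length = List.zipWith pvTr a s := by
    rw [pvPref]
    simp [pv_zipWith_take_right]
  by_cases hnil : a = []
  · subst hnil; simp
  · have hlen0 : a.length ≠ 0 := by simpa [List.length_eq_zero_iff] using hnil
    show (if a.length = 0 then 0 else (pvPref a s a.length).sum) = _
    rw [if_neg hlen0, hfull]
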